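-- pv_equiv track=rewrite | github.com/FlowSight/coding | company wise/stripe/random source/store_penalty.py | find_best_closing_time
-- ===== SOURCE A (Python) =====
-- def compute_penalty(store_log, close):
-- 	penalty = 0
-- 	for i, log in enumerate(store_log.split(" ")):
-- 		if (i >= close and log == 'Y') or (i < close and log == 'N'):
-- 			penalty += 1
-- 	return penalty
--
-- def find_best_closing_time(store_log):
-- 	hours = len(store_log)
-- 	best = hours
-- 	lowest_penalty = hours
-- 	for i in range(hours):
-- 		penalty = compute_penalty(store_log, i)
-- 		if penalty < lowest_penalty:
-- 			lowest_penalty = penalty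
-- 			best = i
-- 	return best
-- ===== SOURCE B (Python) =====
-- def find_best_closing_time(store_log):
--     tokens = store_log.split(" ")
--     hours = len(store_log)
--     best = hours
--     lowest = hours
--     p = sum(1 if t == 'Y' else 0 for t in tokens)  # penalty of closing at 0
--     for i in range(hours):
--         if p < lowest:
--             lowest = p
--             best = i
--         # penalty(i+1) = penalty(i) - [tokens[i]=='Y'] + [tokens[i]=='N']
--         if i < len(tokens):
--             t = tokens[i]
--             if t == 'Y':
--                 p -= 1
--             elif t == 'N':
--                 p += 1
--     return best
-- ===== Notes on version B (the rewrite author's own statement) =====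
-- stated objective: faster
-- what changed: Instead of recomputing the whole penalty from scratch for every candidate closing time (a full scan of all tokens per candidate), B computes the closing-at-0 penalty once and updates it incrementally by +-1 per step from the token at the previous index, a single pass.
import Mathlib
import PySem

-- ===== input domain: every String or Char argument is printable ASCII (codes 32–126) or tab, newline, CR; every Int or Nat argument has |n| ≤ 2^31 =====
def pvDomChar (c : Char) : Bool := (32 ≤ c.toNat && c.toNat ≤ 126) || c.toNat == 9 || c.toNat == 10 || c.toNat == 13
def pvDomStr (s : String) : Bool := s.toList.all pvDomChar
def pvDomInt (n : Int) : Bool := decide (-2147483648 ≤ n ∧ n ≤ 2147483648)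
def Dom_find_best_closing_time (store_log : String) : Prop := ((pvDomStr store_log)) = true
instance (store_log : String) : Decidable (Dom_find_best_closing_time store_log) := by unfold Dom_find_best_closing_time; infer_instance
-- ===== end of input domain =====

-- B replaces A's full penalty recomputation per candidate closing time by one
-- incremental ±1 update per step (single pass); a timing run measures the speed-up.

-- ===== PORT A =====
-- helper compute_penalty: scans all tokens of store_log.split(" ") for one candidate close
def compute_penalty (store_log : String) (close : Int) : Int :=
  -- split? is `some` here since the separator " " is nonempty, so getD [] never fires
  (PySem.List.enumerate ((PySem.Str.split? store_log " ").getD [])).foldl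
    (fun penalty il =>
      if (close ≤ il.1 ∧ il.2 = "Y") ∨ (il.1 < close ∧ il.2 = "N") then penalty + 1 else penalty)
    0

-- loop body of A's `for i in range(hours)` (state = (best, lowest_penalty))
def pvLoopA (store_log : String) (s : Int × Int) (i : Int) : Int × Int :=
  let penalty := compute_penalty store_log i
  if penalty < s.2 then (i, penalty) else s

def find_best_closing_time (store_log : String) : Int :=
  let hours := PySem.Str.len store_log
  ((PySem.List.pyRange 0 hours 1).foldl (pvLoopA store_log) (hours, hours)).1

-- ===== PORT B =====
-- loop body of B's single pass (state = (best, lowest, p)); the pyGet? match is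
-- Source B's `if i < len(tokens)` guard (i is never negative inside the loop)
def pvLoopB (tokens : List String) (s : Int × Int × Int) (i : Int) : Int × Int × Int :=
  let s' := if s.2.2 < s.2.1 then (i, s.2.2, s.2.2) else s
  match PySem.List.pyGet? tokens i with
  | some t =>
      if t = "Y" then (s'.1, s'.2.1, s'.2.2 - 1)
      else if t = "N" then (s'.1, s'.2.1, s'.2.2 + 1)
      else s'
  | none => s'

def find_best_closing_time_alt (store_log : String) : Int :=
  let tokens := (PySem.Str.split? store_log " ").getD []   -- some: separator is nonempty
  let hours := PySem.Str.len store_log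
  let p0 : Int := tokens.foldl (fun acc t => acc + (if t = "Y" then 1 else 0)) 0
  ((PySem.List.pyRange 0 hours 1).foldl (pvLoopB tokens) (hours, hours, p0)).1

-- ===== PRECONDITION & SPEC =====
def Spec_find_best_closing_time (store_log : String) (out : Int) : Prop := out = find_best_closing_time_alt store_log
instance (store_log : String) (out : Int) : Decidable (Spec_find_best_closing_time store_log out) := by unfold Spec_find_best_closing_time; infer_instance

-- ===== CLAIM (what is proved, stated in full; the proofs are below) =====
def Claim_equal_find_best_closing_time : Prop := ∀ (store_log : String), Dom_find_best_closing_time store_log → Spec_find_best_closing_time store_log (find_best_closing_time store_log)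

-- ===== LEMMAS AND PROOFS =====

-- A's inner fold, with an explicit accumulator
def penF (close : Int) (l : List (Int × String)) (acc : Int) : Int :=
  l.foldl
    (fun penalty il =>
      if (close ≤ il.1 ∧ il.2 = "Y") ∨ (il.1 < close ∧ il.2 = "N") then penalty + 1 else penalty)
    acc

-- the same quantity as a sum of 0/1 indicators
def Pen (close : Int) (l : List (Int × String)) : Int :=
  (l.map (fun il =>
    if (close ≤ il.1 ∧ il.2 = "Y") ∨ (il.1 < close ∧ il.2 = "N") then (1 : Int) else 0)).sum

-- the change of the penalty when the closing time moves from c to c+1: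
-- -1 if the token at index c (counting from s) is "Y", +1 if "N", else 0
def pvDelta (toks : List String) (s c : Int) : Int :=
  match toks with
  | [] => 0
  | t :: rest =>
      if c = s then (if t = "Y" then -1 else if t = "N" then 1 else 0)
      else pvDelta rest (s + 1) c

theorem penF_eq_Pen (close : Int) (l : List (Int × String)) :
    ∀ acc : Int, penF close l acc = acc + Pen close l := by
  induction l with
  | nil => intro acc; simp [penF, Pen]
  | cons x l ih =>
    intro acc
    simp only [penF, List.foldl_cons, Pen, List.map_cons, List.sum_cons] at *
    rw [ih]
    split_ifs <;> ring

theorem Pen_high (c : Int) (l : List (Int × String)) (h : ∀ p ∈ l, c + 1 ≤ p.1) :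
    Pen (c + 1) l = Pen c l := by
  unfold Pen
  congr 1
  apply List.map_congr_left
  intro p hp
  have hc := h p hp
  have hiff : ((c + 1 ≤ p.1 ∧ p.2 = "Y") ∨ (p.1 < c + 1 ∧ p.2 = "N")) ↔
      ((c ≤ p.1 ∧ p.2 = "Y") ∨ (p.1 < c ∧ p.2 = "N")) := by
    constructor
    · rintro (⟨h1, h2⟩ | ⟨h1, h2⟩)
      · exact Or.inl ⟨by omega, h2⟩
      · omega
    · rintro (⟨h1, h2⟩ | ⟨h1, h2⟩)
      · exact Or.inl ⟨by omega, h2⟩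
      · omega
  rw [if_congr hiff rfl rfl]

theorem Pen_enum_succ (toks : List String) :
    ∀ (s c : Int), s ≤ c →
      Pen (c + 1) (PySem.List.enumerate toks s)
        = Pen c (PySem.List.enumerate toks s) + pvDelta toks s c := by
  induction toks with
  | nil => intro s c _; simp [PySem.List.enumerate_nil, Pen, pvDelta]
  | cons t rest ih =>
    intro s c hsc
    rw [PySem.List.enumerate_cons]
    have htail : ∀ p ∈ PySem.List.enumerate rest (s + 1), s + 1 ≤ p.1 := by
      intro p hp
      rcases (PySem.List.mem_enumerate_iff rest (s + 1) p).mp hp with ⟨k, hk, rfl⟩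
      simp
    by_cases hcs : c = s
    · subst hcs
      have hrest : Pen (c + 1) (PySem.List.enumerate rest (c + 1))
          = Pen c (PySem.List.enumerate rest (c + 1)) := Pen_high c _ htail
      simp only [Pen, List.map_cons, List.sum_cons, pvDelta] at *
      rw [hrest]
      have e1 : ¬ (c + 1 ≤ c) := by omega
      have e2 : c < c + 1 := by omega
      have e3 : ¬ (c < c) := by omega
      have e4 : c ≤ c := le_rfl
      rcases eq_or_ne t "Y" with hy | hy
      · simp [hy, e1]
      · rcases eq_or_ne t "N" with hn | hn
        · simp [hn, e1, e2]; ring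
        · simp [hy, hn, e1, e2]
    · have hs1 : s + 1 ≤ c := by omega
      have hrest := ih (s + 1) c hs1
      simp only [Pen, List.map_cons, List.sum_cons, pvDelta, if_neg hcs] at *
      rw [hrest]
      have h1 : ¬ (c + 1 ≤ s) := by omega
      have h2 : ¬ (c ≤ s) := by omega
      have h3 : s < c + 1 := by omega
      have h4 : s < c := by omega
      simp only [h1, h2, h3, h4, false_and, true_and, false_or]
      ring

theorem pvDelta_get (toks : List String) :
    ∀ (s c : Int), s ≤ c →
      pvDelta toks s c
        = (match PySem.List.pyGet? toks (c - s) with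
           | some t => if t = "Y" then -1 else if t = "N" then 1 else 0
           | none => 0) := by
  induction toks with
  | nil => intro s c _; simp [pvDelta, PySem.List.pyGet?]
  | cons t rest ih =>
    intro s c hsc
    by_cases hcs : c = s
    · subst hcs
      have : PySem.List.pyGet? (t :: rest) (c - c) = some t := by
        have h0 : c - c = ((0 : Nat) : Int) := by omega
        rw [h0, PySem.List.pyGet?_natCast]; rfl
      rw [this]
      simp [pvDelta]
    · have hlt : s + 1 ≤ c := by omega
      have hnn : c - s = (((c - s).toNat : Nat) : Int) := by omega
      have hpos : (c - s).toNat = (c - (s + 1)).toNat + 1 := by omega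
      have hnn2 : c - (s + 1) = (((c - (s + 1)).toNat : Nat) : Int) := by omega
      have hget : PySem.List.pyGet? (t :: rest) (c - s) = PySem.List.pyGet? rest (c - (s + 1)) := by
        rw [hnn, PySem.List.pyGet?_natCast, hpos, List.getElem?_cons_succ]
        conv_rhs => rw [hnn2, PySem.List.pyGet?_natCast]
      rw [hget, ← ih (s + 1) c hlt]
      simp [pvDelta, hcs]

-- the penalty recurrence: moving close from i to i+1 changes it by the token at index i
theorem pen_succ (store_log : String) (i : Int) (hi : 0 ≤ i) :
    compute_penalty store_log (i + 1)
      = compute_penalty store_log i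
        + (match PySem.List.pyGet? ((PySem.Str.split? store_log " ").getD []) i with
           | some t => if t = "Y" then -1 else if t = "N" then 1 else 0
           | none => 0) := by
  have hA : ∀ c : Int, compute_penalty store_log c
      = Pen c (PySem.List.enumerate ((PySem.Str.split? store_log " ").getD [])) := by
    intro c
    have := penF_eq_Pen c (PySem.List.enumerate ((PySem.Str.split? store_log " ").getD [])) 0
    simpa [penF, compute_penalty] using this
  rw [hA, hA, Pen_enum_succ _ 0 i hi, pvDelta_get _ 0 i hi]
  simp

-- closing at 0: the penalty is the number of "Y" tokens (computed as B's initial sum)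
theorem pen_zero_aux (toks : List String) :
    ∀ (s : Int), 0 ≤ s → ∀ acc : Int,
      penF 0 (PySem.List.enumerate toks s) acc
        = toks.foldl (fun acc t => acc + (if t = "Y" then 1 else 0)) acc := by
  induction toks with
  | nil => intro s _ acc; simp [PySem.List.enumerate_nil, penF]
  | cons t rest ih =>
    intro s hs acc
    rw [PySem.List.enumerate_cons]
    simp only [penF, List.foldl_cons] at *
    have h1 : ((0 : Int) ≤ s ∧ t = "Y") ∨ (s < 0 ∧ t = "N") ↔ t = "Y" := by
      constructor
      · rintro (⟨_, h⟩ | ⟨h, _⟩)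
        · exact h
        · exact absurd h (by omega)
      · intro h
        exact Or.inl ⟨hs, h⟩
    rw [if_congr h1 rfl rfl]
    have := ih (s + 1) (by omega) (if t = "Y" then acc + 1 else acc)
    rw [this]
    congr 1
    split_ifs <;> ring

theorem pen_zero (store_log : String) :
    compute_penalty store_log 0
      = ((PySem.Str.split? store_log " ").getD []).foldl
          (fun acc t => acc + (if t = "Y" then 1 else 0)) 0 := by
  have := pen_zero_aux ((PySem.Str.split? store_log " ").getD []) 0 le_rfl 0
  simpa [compute_penalty, penF] using this

-- one step of B rewritten as: update (best, lowest), then add the token delta to p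
theorem pvLoopB_eq (tokens : List String) (s : Int × Int × Int) (i : Int) :
    pvLoopB tokens s i
      = (let s' := if s.2.2 < s.2.1 then (i, s.2.2, s.2.2) else s
         (s'.1, s'.2.1, s'.2.2
           + (match PySem.List.pyGet? tokens i with
              | some t => if t = "Y" then -1 else if t = "N" then 1 else 0
              | none => 0))) := by
  unfold pvLoopB
  cases h : PySem.List.pyGet? tokens i with
  | none => simp
  | some t =>
    rcases eq_or_ne t "Y" with hy | hy
    · subst hy
      simp only [if_pos rfl]
      split_ifs <;> simp only [Prod.mk.injEq] <;> exact ⟨trivial, trivial, by ring⟩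
    · rcases eq_or_ne t "N" with hn | hn
      · subst hn
        simp only [if_neg hy, if_pos rfl]
        split_ifs <;> simp only [Prod.mk.injEq] <;> exact ⟨trivial, trivial, by ring⟩
      · simp only [if_neg hy, if_neg hn]
        split_ifs <;> simp

-- the loop invariant: with p = penalty(j), both folds over range(j, hours) agree on best
theorem loop_eq (store_log : String) (hours : Int) :
    ∀ (n : Nat) (j best lowest : Int), 0 ≤ j → (hours - j).toNat = n →
      ((PySem.List.pyRange j hours 1).foldl (pvLoopA store_log) (best, lowest)).1
        = ((PySem.List.pyRange j hours 1).foldl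
            (pvLoopB ((PySem.Str.split? store_log " ").getD []))
            (best, lowest, compute_penalty store_log j)).1 := by
  intro n
  induction n with
  | zero =>
    intro j best lowest hj hn
    rw [PySem.List.pyRange_one_eq_nil (by omega)]
    simp
  | succ n ih =>
    intro j best lowest hj hn
    have hjh : j < hours := by omega
    rw [PySem.List.pyRange_one_cons hjh]
    simp only [List.foldl_cons]
    have hA : pvLoopA store_log (best, lowest) j
        = (if compute_penalty store_log j < lowest then (j, compute_penalty store_log j)
           else (best, lowest)) := rfl
    have hB : pvLoopB ((PySem.Str.split? store_log " ").getD [])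
          (best, lowest, compute_penalty store_log j) j
        = (if compute_penalty store_log j < lowest
           then (j, compute_penalty store_log j, compute_penalty store_log (j + 1))
           else (best, lowest, compute_penalty store_log (j + 1))) := by
      rw [pvLoopB_eq, pen_succ store_log j hj]
      by_cases hlt : compute_penalty store_log j < lowest <;> simp [hlt]
    rw [hA, hB]
    by_cases hlt : compute_penalty store_log j < lowest
    · simp only [if_pos hlt]
      exact ih (j + 1) j (compute_penalty store_log j) (by omega) (by omega)
    · simp only [if_neg hlt]
      exact ih (j + 1) best lowest (by omega) (by omega)

-- ===== VERDICT (by name: the statement is the Claim_ definition above) =====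
theorem find_best_closing_time_spec : Claim_equal_find_best_closing_time := by
  intro store_log _
  show ((PySem.List.pyRange 0 (PySem.Str.len store_log) 1).foldl (pvLoopA store_log)
      (PySem.Str.len store_log, PySem.Str.len store_log)).1
    = ((PySem.List.pyRange 0 (PySem.Str.len store_log) 1).foldl
        (pvLoopB ((PySem.Str.split? store_log " ").getD []))
        (PySem.Str.len store_log, PySem.Str.len store_log,
         ((PySem.Str.split? store_log " ").getD []).foldl
           (fun acc t => acc + (if t = "Y" then 1 else 0)) 0)).1
  rw [← pen_zero store_log]
  exact loop_eq store_log (PySem.Str.len store_log) (PySem.Str.len store_log - 0).toNat 0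
    (PySem.Str.len store_log) (PySem.Str.len store_log) le_rfl rfl
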